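-- pv_equiv track=rewrite | github.com/jemtca/CodingBat | Python/Map-2/first_swap.py | first_swap
-- ===== SOURCE A (Python) =====
-- def first_swap(str):
--     d = {}
--     d_first_char = {}
--
--     for index, value in enumerate(str):
--         if not value[0] in d_first_char:
--             if not value[0] in d:
--                 d[value[0]] = index
--             else:
--                 i = d[value[0]]
--                 v = str[i]
--                 str[i] = value
--                 str[index] = v
--                 del d[value[0]]
--                 d_first_char[value[0]] = value[0]
--
--     return str
-- ===== SOURCE B (Python) =====
-- def first_swap(str):
--     # Bucket indices by first character in one pass, then swap the first two
--     # indices of every bucket that has at least two.  Mutates str in place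
--     # (same final content as the original's online swapping).
--     groups = {}
--     for index, value in enumerate(str):
--         groups.setdefault(value[0], []).append(index)
--     for idxs in groups.values():
--         if len(idxs) >= 2:
--             i, j = idxs[0], idxs[1]
--             str[i], str[j] = str[j], str[i]
--     return str
-- ===== Notes on version B (the rewrite author's own statement) =====
-- stated objective: alternative
-- what changed: Replaces A's online scan with two dicts (pending first index, done chars) and immediate swaps by a group-then-swap pass: one pass buckets each string's indices by first character, then every bucket with two or more indices gets its first two entries swapped.
import Mathlib
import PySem

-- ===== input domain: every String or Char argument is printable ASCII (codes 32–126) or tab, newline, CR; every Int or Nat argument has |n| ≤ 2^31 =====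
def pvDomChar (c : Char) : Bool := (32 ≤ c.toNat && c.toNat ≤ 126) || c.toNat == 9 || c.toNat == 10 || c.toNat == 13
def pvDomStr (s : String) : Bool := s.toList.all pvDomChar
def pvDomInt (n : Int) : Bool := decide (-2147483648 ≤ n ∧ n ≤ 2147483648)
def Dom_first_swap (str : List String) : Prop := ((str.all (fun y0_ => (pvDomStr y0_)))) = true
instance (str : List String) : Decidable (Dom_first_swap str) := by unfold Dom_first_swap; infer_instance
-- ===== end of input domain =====

-- B replaces A's online two-dict scan with a bucket-then-swap two-pass (same cost); both
-- Pythons mutate the list in place and return it — the equivalence is about the returned content.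

-- value[0]: exact for nonempty strings (Pre_ excludes ""); shared by both ports
def pvFirstChar (s : String) : Char := s.toList.headD ' '

-- list(enumerate(xs, n)) with Nat indices (all indices here are nonnegative)
def pvEnum : List String → Nat → List (Nat × String)
  | [], _ => []
  | x :: xs, n => (n, x) :: pvEnum xs (n + 1)

-- ===== PORT A =====
-- the for-loop of A: state = (d, d_first_char, the mutated list); reads/writes str[i]
-- via List.getD/List.set — exact because every index stored in d is in range
def fsLoopA : List (Nat × String) → PySem.Dict Char Nat → PySem.Dict Char Char →
    List String → List String
  | [], _, _, cur => cur
  | (index, value) :: rest, d, dfc, cur =>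
    let c := pvFirstChar value
    if dfc.contains c then
      fsLoopA rest d dfc cur
    else
      match d.get? c with
      | none => fsLoopA rest (d.insert c index) dfc cur
      | some i =>
        let v := cur.getD i ""
        fsLoopA rest (d.erase c) (dfc.insert c c) ((cur.set i value).set index v)

def first_swap (str : List String) : List String :=
  fsLoopA (pvEnum str 0) PySem.Dict.empty PySem.Dict.empty str

-- ===== PORT B =====
-- second loop of B: for idxs in groups.values(): if len(idxs) >= 2: swap first two
def fsLoopB (vals : List (List Nat)) (cur : List String) : List String :=
  vals.foldl (fun cur idxs =>
    match idxs with
    | i :: j :: _ => (cur.set i (cur.getD j "")).set j (cur.getD i "")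
    | _ => cur) cur

def first_swap_alt (str : List String) : List String :=
  -- groups.setdefault(value[0], []).append(index)  =  modify with default []
  let groups := (pvEnum str 0).foldl
    (fun g p => g.modify (pvFirstChar p.2) [] (· ++ [p.1]))
    (PySem.Dict.empty : PySem.Dict Char (List Nat))
  fsLoopB groups.values str

-- ===== PRECONDITION & SPEC =====
-- Pre_ excludes lists containing an empty string: there value[0] raises IndexError in A
-- (and in B alike); A never returns on such input.
def Pre_first_swap (str : List String) : Prop := ∀ s ∈ str, s ≠ ""
instance (str : List String) : Decidable (Pre_first_swap str) := by unfold Pre_first_swap; infer_instance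

def pvWitness_first_swap : List String := ["ax", "by", "and", "quo"]

def Spec_first_swap (str : List String) (out : List String) : Prop := out = first_swap_alt str
instance (str : List String) (out : List String) : Decidable (Spec_first_swap str out) := by unfold Spec_first_swap; infer_instance

-- ===== CLAIM (what is proved, stated in full; the proofs are below) =====
def Claim_equal_first_swap : Prop := ∀ (str : List String), Dom_first_swap str → Pre_first_swap str → Spec_first_swap str (first_swap str)



-- the common swap operation: str[i], str[j] = str[j], str[i]
def pvSwapOp (cur : List String) (p : Nat × Nat) : List String :=
  (cur.set p.1 (cur.getD p.2 "")).set p.2 (cur.getD p.1 "")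

-- first two indices of a bucket, if it has at least two
def pvFPair : List Nat → Option (Nat × Nat)
  | i :: j :: _ => some (i, j)
  | _ => none

-- the swaps B performs, read off the groups dict
def pvP (g : PySem.Dict Char (List Nat)) : List (Nat × Nat) := g.values.filterMap pvFPair

-- the swaps A performs, in A's order (mirror of fsLoopA)
def pvSwapsA : List (Nat × String) → PySem.Dict Char Nat → PySem.Dict Char Char →
    List (Nat × Nat)
  | [], _, _ => []
  | (index, value) :: rest, d, dfc =>
    let c := pvFirstChar value
    if dfc.contains c then
      pvSwapsA rest d dfc
    else
      match d.get? c with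
      | none => pvSwapsA rest (d.insert c index) dfc
      | some i => (i, index) :: pvSwapsA rest (d.erase c) (dfc.insert c c)

def pvFlat (ps : List (Nat × Nat)) : List Nat := ps.flatMap (fun p => [p.1, p.2])

def pvBuildG (l : List (Nat × String)) (g : PySem.Dict Char (List Nat)) :
    PySem.Dict Char (List Nat) :=
  l.foldl (fun g p => g.modify (pvFirstChar p.2) [] (· ++ [p.1])) g

-- relation between A's scan state and B's groups dict over the same processed prefix
def pvRel (d : PySem.Dict Char Nat) (dfc : PySem.Dict Char Char)
    (g : PySem.Dict Char (List Nat)) : Prop :=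
  (∀ c, dfc.contains c = true ↔ ∃ is, g.get? c = some is ∧ 2 ≤ is.length) ∧
  (∀ c i, d.get? c = some i ↔ g.get? c = some [i]) ∧
  (∀ c, g.get? c ≠ some []) ∧
  g.keys.Nodup


theorem pv_get?_erase {κ ν : Type} [BEq κ] [LawfulBEq κ] [DecidableEq κ] (d : PySem.Dict κ ν) (k k' : κ) :
    (d.erase k).get? k' = if k' = k then none else d.get? k' := by
  obtain ⟨items⟩ := d
  simp only [PySem.Dict.erase, PySem.Dict.get?, List.find?_filter]
  by_cases hkk : k' = k
  · subst hkk
    rw [if_pos rfl]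
    rw [List.find?_eq_none.mpr ?_]
    · rfl
    · intro x _
      by_cases hx : x.1 = k' <;> simp [hx]
  · rw [if_neg hkk]
    have : (fun a : κ × ν => decide ((!a.1 == k) = true ∧ (a.1 == k') = true))
        = (fun p : κ × ν => p.1 == k') := by
      funext a
      by_cases hx : a.1 = k' <;> simp [hx]
      exact hkk
    rw [this]

theorem pv_dict_split {κ ν : Type} [BEq κ] [LawfulBEq κ] (g : PySem.Dict κ ν) (c : κ) (is : ν)
    (hnd : g.keys.Nodup) (h : g.get? c = some is) :
    ∃ pre suf, g.items = pre ++ (c, is) :: suf ∧ (∀ p ∈ pre, p.1 ≠ c) ∧ (∀ p ∈ suf, p.1 ≠ c) := by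
  have hmem : (c, is) ∈ g.items := PySem.Dict.mem_items_of_get?_eq_some (d := g) h
  obtain ⟨pre, suf, hsplit⟩ := List.append_of_mem hmem
  refine ⟨pre, suf, hsplit, ?_, ?_⟩
  · intro p hp hc
    have : g.keys = pre.map Prod.fst ++ c :: suf.map Prod.fst := by
      simp [PySem.Dict.keys, hsplit]
    rw [this] at hnd
    have := (List.nodup_middle (a := c) (l₁ := pre.map Prod.fst) (l₂ := suf.map Prod.fst)).mp hnd
    have hnotin := (List.nodup_cons.mp this).1
    exact hnotin (by rw [List.mem_append]; exact Or.inl (hc ▸ List.mem_map_of_mem (f := Prod.fst) hp))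
  · intro p hp hc
    have : g.keys = pre.map Prod.fst ++ c :: suf.map Prod.fst := by
      simp [PySem.Dict.keys, hsplit]
    rw [this] at hnd
    have := (List.nodup_middle (a := c) (l₁ := pre.map Prod.fst) (l₂ := suf.map Prod.fst)).mp hnd
    have hnotin := (List.nodup_cons.mp this).1
    exact hnotin (by rw [List.mem_append]; exact Or.inr (hc ▸ List.mem_map_of_mem (f := Prod.fst) hp))

theorem pvEnum_mem (xs : List String) (n : Nat) (p : Nat × String) (hp : p ∈ pvEnum xs n) :
    ∃ k, ∃ h : k < xs.length, p.1 = n + k ∧ p.2 = xs[k] := by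
  induction xs generalizing n with
  | nil => simp [pvEnum] at hp
  | cons x xs ih =>
    simp only [pvEnum, List.mem_cons] at hp
    rcases hp with rfl | hp
    · exact ⟨0, by simp, by simp, by simp⟩
    · obtain ⟨k, hk, h1, h2⟩ := ih (n + 1) hp
      exact ⟨k + 1, by simpa using hk, by omega, by simpa using h2⟩

theorem pvEnum_pairwise (xs : List String) (n : Nat) :
    (pvEnum xs n).Pairwise (fun p q => p.1 < q.1) := by
  induction xs generalizing n with
  | nil => simp [pvEnum]
  | cons x xs ih =>
    refine List.Pairwise.cons ?_ (ih (n + 1))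
    intro q hq
    obtain ⟨k, hk, h1, _⟩ := pvEnum_mem xs (n + 1) q hq
    simp; omega

theorem fsLoopA_eq (l : List (Nat × String)) (d : PySem.Dict Char Nat)
    (dfc : PySem.Dict Char Char) (cur : List String)
    (H1 : ∀ p ∈ l, cur[p.1]? = some p.2)
    (H2 : l.Pairwise (fun p q => p.1 < q.1))
    (H3 : ∀ c i, d.get? c = some i → ∀ p ∈ l, i < p.1) :
    fsLoopA l d dfc cur = (pvSwapsA l d dfc).foldl pvSwapOp cur := by
  induction l generalizing d dfc cur with
  | nil => rfl
  | cons hd rest ih =>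
    obtain ⟨index, value⟩ := hd
    set c := pvFirstChar value with hc
    rw [List.pairwise_cons] at H2
    simp only [fsLoopA, pvSwapsA, ← hc]
    by_cases hdfc : dfc.contains c
    · rw [if_pos hdfc, if_pos hdfc]
      exact ih d dfc cur (fun p hp => H1 p (List.mem_cons_of_mem _ hp)) H2.2
        (fun c' i' h' p hp => H3 c' i' h' p (List.mem_cons_of_mem _ hp))
    · rw [if_neg hdfc, if_neg hdfc]
      cases hget : d.get? c with
      | none =>
        exact ih _ dfc cur (fun p hp => H1 p (List.mem_cons_of_mem _ hp)) H2.2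
          (fun c' i' h' p hp => by
            rw [PySem.Dict.get?_insert] at h'
            split_ifs at h' with he
            · cases h'; exact H2.1 p hp
            · exact H3 c' i' h' p (List.mem_cons_of_mem _ hp))
      | some i =>
        have hi : ∀ p ∈ rest, i < p.1 := fun p hp =>
          H3 c i hget p (List.mem_cons_of_mem _ hp)
        have hival : cur.getD index "" = value := by
          rw [List.getD_eq_getElem?_getD, H1 (index, value) List.mem_cons_self]
          rfl
        have hswap : (cur.set i value).set index (cur.getD i "") = pvSwapOp cur (i, index) := by
          simp only [pvSwapOp, hival]
        show fsLoopA rest (d.erase c) (dfc.insert c c) ((cur.set i value).set index (cur.getD i "")) =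
          List.foldl pvSwapOp cur ((i, index) :: pvSwapsA rest (d.erase c) (dfc.insert c c))
        rw [hswap, List.foldl_cons]
        refine ih _ _ (pvSwapOp cur (i, index)) ?_ H2.2 ?_
        · intro p hp
          have h1 : p.1 ≠ index := Nat.ne_of_gt (H2.1 p hp)
          have h2 : p.1 ≠ i := Nat.ne_of_gt (hi p hp)
          simp only [pvSwapOp]
          rw [List.getElem?_set_ne (by exact fun e => h1 e.symm),
            List.getElem?_set_ne (by exact fun e => h2 e.symm)]
          exact H1 p (List.mem_cons_of_mem _ hp)
        · intro c' i' h' p hp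
          rw [pv_get?_erase] at h'
          split_ifs at h' with he
          exact H3 c' i' h' p (List.mem_cons_of_mem _ hp)

theorem pvSwapsA_nodup (l : List (Nat × String)) (d : PySem.Dict Char Nat)
    (dfc : PySem.Dict Char Char)
    (H2 : l.Pairwise (fun p q => p.1 < q.1))
    (H3 : ∀ c i, d.get? c = some i → ∀ p ∈ l, i < p.1)
    (Hinj : ∀ c c' i, d.get? c = some i → d.get? c' = some i → c = c') :
    (pvFlat (pvSwapsA l d dfc)).Nodup ∧
      ∀ x ∈ pvFlat (pvSwapsA l d dfc), (∃ c, d.get? c = some x) ∨ ∃ p ∈ l, x = p.1 := by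
  induction l generalizing d dfc with
  | nil => exact ⟨List.nodup_nil, by intro x hx; simp [pvFlat, pvSwapsA] at hx⟩
  | cons hd rest ih =>
    obtain ⟨index, value⟩ := hd
    set c := pvFirstChar value with hc
    rw [List.pairwise_cons] at H2
    have hH3r : ∀ c' i', d.get? c' = some i' → ∀ p ∈ rest, i' < p.1 :=
      fun c' i' h' p hp => H3 c' i' h' p (List.mem_cons_of_mem _ hp)
    simp only [pvSwapsA, ← hc]
    by_cases hdfc : dfc.contains c
    · rw [if_pos hdfc]
      obtain ⟨hnd, hmem⟩ := ih d dfc H2.2 hH3r Hinj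
      exact ⟨hnd, fun x hx => (hmem x hx).imp id
        (fun ⟨p, hp, he⟩ => ⟨p, List.mem_cons_of_mem _ hp, he⟩)⟩
    · rw [if_neg hdfc]
      cases hget : d.get? c with
      | none =>
        have H3' : ∀ c' i', (d.insert c index).get? c' = some i' → ∀ p ∈ rest, i' < p.1 := by
          intro c' i' h' p hp
          rw [PySem.Dict.get?_insert] at h'
          split_ifs at h' with he
          · cases h'; exact H2.1 p hp
          · exact hH3r c' i' h' p hp
        have Hinj' : ∀ c' c'' i', (d.insert c index).get? c' = some i' →
            (d.insert c index).get? c'' = some i' → c' = c'' := by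
          intro c' c'' i' h1 h2
          rw [PySem.Dict.get?_insert] at h1 h2
          split_ifs at h1 h2 with he1 he2 he2
          · rw [he1, he2]
          · cases h1
            exact absurd (H3 c'' index h2 (index, value) List.mem_cons_self) (by simp)
          · cases h2
            exact absurd (H3 c' index h1 (index, value) List.mem_cons_self) (by simp)
          · exact Hinj c' c'' i' h1 h2
        obtain ⟨hnd, hmem⟩ := ih (d.insert c index) dfc H2.2 H3' Hinj'
        refine ⟨hnd, fun x hx => ?_⟩
        rcases hmem x hx with ⟨c', h'⟩ | ⟨p, hp, he⟩
        · rw [PySem.Dict.get?_insert] at h'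
          split_ifs at h' with he
          · cases h'; exact Or.inr ⟨(index, value), List.mem_cons_self, rfl⟩
          · exact Or.inl ⟨c', h'⟩
        · exact Or.inr ⟨p, List.mem_cons_of_mem _ hp, he⟩
      | some i =>
        have H3' : ∀ c' i', (d.erase c).get? c' = some i' → ∀ p ∈ rest, i' < p.1 := by
          intro c' i' h' p hp
          rw [pv_get?_erase] at h'
          split_ifs at h' with he
          exact hH3r c' i' h' p hp
        have Hinj' : ∀ c' c'' i', (d.erase c).get? c' = some i' →
            (d.erase c).get? c'' = some i' → c' = c'' := by
          intro c' c'' i' h1 h2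
          rw [pv_get?_erase] at h1 h2
          split_ifs at h1 h2 with he1 he2
          exact Hinj c' c'' i' h1 h2
        obtain ⟨hnd, hmem⟩ := ih (d.erase c) (dfc.insert c c) H2.2 H3' Hinj'
        have hflat : pvFlat ((i, index) :: pvSwapsA rest (d.erase c) (dfc.insert c c)) =
            i :: index :: pvFlat (pvSwapsA rest (d.erase c) (dfc.insert c c)) := by
          simp [pvFlat]
        rw [hflat]
        have hii : i < index := H3 c i hget (index, value) List.mem_cons_self
        have hiNot : i ∉ pvFlat (pvSwapsA rest (d.erase c) (dfc.insert c c)) := by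
          intro hmem'
          rcases hmem i hmem' with ⟨c', h'⟩ | ⟨p, hp, he⟩
          · rw [pv_get?_erase] at h'
            split_ifs at h' with he
            exact he (Hinj c' c i h' hget)
          · exact absurd (hH3r c i hget p hp) (by omega)
        have hindexNot : index ∉ pvFlat (pvSwapsA rest (d.erase c) (dfc.insert c c)) := by
          intro hmem'
          rcases hmem index hmem' with ⟨c', h'⟩ | ⟨p, hp, he⟩
          · rw [pv_get?_erase] at h'
            split_ifs at h' with he
            exact absurd (H3 c' index h' (index, value) List.mem_cons_self) (by simp)
          · exact absurd (H2.1 p hp) (by omega)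
        refine ⟨?_, ?_⟩
        · refine List.nodup_cons.mpr ⟨?_, List.nodup_cons.mpr ⟨hindexNot, hnd⟩⟩
          simp only [List.mem_cons]
          rintro (rfl | hmem')
          · omega
          · exact hiNot hmem'
        · intro x hx
          rcases List.mem_cons.mp hx with hxe | hx
          · exact Or.inl ⟨c, hxe ▸ hget⟩
          rcases List.mem_cons.mp hx with hxe | hx
          · exact Or.inr ⟨(index, value), List.mem_cons_self, hxe⟩
          rcases hmem x hx with ⟨c', h'⟩ | ⟨p, hp, he⟩
          · rw [pv_get?_erase] at h'
            split_ifs at h' with he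
            exact Or.inl ⟨c', h'⟩
          · exact Or.inr ⟨p, List.mem_cons_of_mem _ hp, he⟩

theorem pv_get?_modify (g : PySem.Dict Char (List Nat)) (c c' : Char) (f : List Nat → List Nat) :
    (g.modify c [] f).get? c' = if c' = c then some (f (g.getD c [])) else g.get? c' := by
  rw [PySem.Dict.modify, PySem.Dict.get?_insert]

theorem pv_items_modify_some (g : PySem.Dict Char (List Nat)) (c : Char) (is : List Nat)
    (idx : Nat) (hnd : g.keys.Nodup) (h : g.get? c = some is) :
    ∃ (pre suf : List (Char × List Nat)), g.values = pre.map Prod.snd ++ is :: suf.map Prod.snd ∧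
      (g.modify c [] (· ++ [idx])).values = pre.map Prod.snd ++ (is ++ [idx]) :: suf.map Prod.snd := by
  obtain ⟨pre, suf, hsplit, hpre, hsuf⟩ := pv_dict_split g c is hnd h
  refine ⟨pre, suf, by simp [PySem.Dict.values, hsplit], ?_⟩
  have hcont : g.contains c = true := by
    rw [PySem.Dict.contains_eq_isSome_get?, h]; rfl
  have hgetD : g.getD c [] = is := PySem.Dict.getD_of_get?_eq_some g [] h
  rw [PySem.Dict.modify, hgetD]
  have hitems := PySem.Dict.items_insert_of_contains g (is ++ [idx]) hcont
  simp only [PySem.Dict.values, hitems, hsplit]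
  simp only [List.map_append, List.map_cons, List.map_map]
  have h1 : ∀ (L : List (Char × List Nat)), (∀ p ∈ L, p.1 ≠ c) →
      L.map (Prod.snd ∘ (fun p => if (p.1 == c) = true then (c, is ++ [idx]) else p)) = L.map Prod.snd := by
    intro L hL
    apply List.map_congr_left
    intro p hp
    simp [beq_iff_eq, hL p hp]
  rw [h1 pre hpre, h1 suf hsuf]
  simp

theorem pvP_modify_none (g : PySem.Dict Char (List Nat)) (c : Char) (idx : Nat)
    (h : g.get? c = none) :
    pvP (g.modify c [] (· ++ [idx])) = pvP g := by
  have hcont : g.contains c = false := (PySem.Dict.get?_eq_none_iff_contains g c).mp h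
  have hgetD : g.getD c [] = [] := by
    rw [PySem.Dict.getD_eq_get?_getD, h]; rfl
  rw [pvP, PySem.Dict.modify, hgetD]
  have hitems := PySem.Dict.items_insert_of_not_contains g ([] ++ [idx]) hcont
  simp only [PySem.Dict.values, hitems, List.map_append, List.filterMap_append]
  simp [pvP, PySem.Dict.values, pvFPair]

theorem pvP_modify_single (g : PySem.Dict Char (List Nat)) (c : Char) (i idx : Nat)
    (hnd : g.keys.Nodup) (h : g.get? c = some [i]) :
    (pvP (g.modify c [] (· ++ [idx]))).Perm (pvP g ++ [(i, idx)]) := by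
  obtain ⟨pre, suf, hv, hv'⟩ := pv_items_modify_some g c [i] idx hnd h
  rw [pvP, pvP, hv, hv']
  simp only [List.filterMap_append, List.filterMap_cons]
  show (List.filterMap pvFPair (pre.map Prod.snd) ++ ((i, idx) :: List.filterMap pvFPair (suf.map Prod.snd))).Perm _
  refine (List.perm_middle).trans ?_
  show ((i, idx) :: (List.filterMap pvFPair (pre.map Prod.snd) ++ List.filterMap pvFPair (suf.map Prod.snd))).Perm _
  refine (List.perm_append_singleton _ _).symm.trans ?_
  simp [pvFPair]

theorem pvP_modify_big (g : PySem.Dict Char (List Nat)) (c : Char) (a b : Nat) (t : List Nat)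
    (idx : Nat) (hnd : g.keys.Nodup) (h : g.get? c = some (a :: b :: t)) :
    pvP (g.modify c [] (· ++ [idx])) = pvP g := by
  obtain ⟨pre, suf, hv, hv'⟩ := pv_items_modify_some g c (a :: b :: t) idx hnd h
  rw [pvP, pvP, hv, hv']
  simp [List.filterMap_append, List.filterMap_cons, pvFPair]

theorem pvP_perm (l : List (Nat × String)) (d : PySem.Dict Char Nat)
    (dfc : PySem.Dict Char Char) (g : PySem.Dict Char (List Nat)) (hrel : pvRel d dfc g) :
    (pvP (pvBuildG l g)).Perm (pvP g ++ pvSwapsA l d dfc) := by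
  induction l generalizing d dfc g with
  | nil => simp [pvBuildG, pvSwapsA]
  | cons hd rest ih =>
    obtain ⟨index, value⟩ := hd
    obtain ⟨R1, R2, R3, R4⟩ := hrel
    set c := pvFirstChar value with hc
    set g' := g.modify c [] (· ++ [index]) with hg'
    have hbuild : pvBuildG ((index, value) :: rest) g = pvBuildG rest g' := rfl
    have hnd' : g'.keys.Nodup := by
      rw [hg', PySem.Dict.modify]
      exact PySem.Dict.nodup_keys_insert _ _ _ R4
    rw [hbuild]
    simp only [pvSwapsA, ← hc]
    by_cases hdfc : dfc.contains c
    · rw [if_pos hdfc]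
      obtain ⟨is, hgc, hlen⟩ := (R1 c).mp hdfc
      obtain ⟨a, b, t, rfl⟩ : ∃ a b t, is = a :: b :: t := by
        match is, hlen with
        | a :: b :: t, _ => exact ⟨a, b, t, rfl⟩
      have hgetD : g.getD c [] = a :: b :: t := PySem.Dict.getD_of_get?_eq_some g [] hgc
      have hget' : ∀ c', g'.get? c' =
          if c' = c then some (a :: b :: t ++ [index]) else g.get? c' := by
        intro c'; rw [hg', pv_get?_modify, hgetD]
      have hP : pvP g' = pvP g := pvP_modify_big g c a b t index R4 hgc
      have hrel' : pvRel d dfc g' := by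
        refine ⟨?_, ?_, ?_, hnd'⟩
        · intro c'
          rw [hget' c']
          by_cases he : c' = c
          · subst he
            simp only [if_pos rfl]
            constructor
            · intro _; exact ⟨a :: b :: t ++ [index], rfl, by simp⟩
            · intro _; exact hdfc
          · rw [if_neg he]; exact R1 c'
        · intro c' i
          rw [hget' c']
          by_cases he : c' = c
          · subst he
            simp only [if_pos rfl]
            constructor
            · intro hd'
              have := (R2 c i).mp hd'
              rw [hgc] at this
              exact absurd (by injection this) (by simp)
            · intro hcontra
              have : (a :: b :: t ++ [index] : List Nat).length = 1 := by
                rw [show (a :: b :: t ++ [index] : List Nat) = [i] by injection hcontra]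
                rfl
              simp at this
          · rw [if_neg he]; exact R2 c' i
        · intro c'
          rw [hget' c']
          by_cases he : c' = c
          · simp [he]
          · rw [if_neg he]; exact R3 c'
      exact ((ih d dfc g' hrel').trans (by rw [hP]))
    · rw [if_neg hdfc]
      cases hget : d.get? c with
      | none =>
        have hgcn : g.get? c = none := by
          cases hgc : g.get? c with
          | none => rfl
          | some is =>
            cases is with
            | nil => exact absurd hgc (R3 c)
            | cons a t =>
              cases t with
              | nil => exact absurd ((R2 c a).mpr hgc) (by rw [hget]; simp)
              | cons b t' => exact absurd ((R1 c).mpr ⟨a :: b :: t', hgc, by simp⟩) hdfc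
        have hgetD : g.getD c [] = [] := by rw [PySem.Dict.getD_eq_get?_getD, hgcn]; rfl
        have hget' : ∀ c', g'.get? c' = if c' = c then some [index] else g.get? c' := by
          intro c'; rw [hg', pv_get?_modify, hgetD]; rfl
        have hP : pvP g' = pvP g := pvP_modify_none g c index hgcn
        have hrel' : pvRel (d.insert c index) dfc g' := by
          refine ⟨?_, ?_, ?_, hnd'⟩
          · intro c'
            rw [hget' c']
            by_cases he : c' = c
            · subst he
              simp only [if_pos rfl]
              constructor
              · intro h'; exact absurd h' hdfc
              · rintro ⟨is', his', hlen'⟩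
                injection his' with his'
                rw [← his'] at hlen'
                simp at hlen'
            · rw [if_neg he]; exact R1 c'
          · intro c' i
            rw [hget' c', PySem.Dict.get?_insert]
            by_cases he : c' = c
            · subst he
              simp
            · rw [if_neg he, if_neg he]; exact R2 c' i
          · intro c'
            rw [hget' c']
            by_cases he : c' = c
            · simp [he]
            · rw [if_neg he]; exact R3 c'
        exact ((ih _ dfc g' hrel').trans (by rw [hP]))
      | some i =>
        have hgc : g.get? c = some [i] := (R2 c i).mp hget
        have hgetD : g.getD c [] = [i] := PySem.Dict.getD_of_get?_eq_some g [] hgc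
        have hget' : ∀ c', g'.get? c' = if c' = c then some [i, index] else g.get? c' := by
          intro c'; rw [hg', pv_get?_modify, hgetD]; rfl
        have hP : (pvP g').Perm (pvP g ++ [(i, index)]) := pvP_modify_single g c i index R4 hgc
        have hrel' : pvRel (d.erase c) (dfc.insert c c) g' := by
          refine ⟨?_, ?_, ?_, hnd'⟩
          · intro c'
            rw [hget' c', PySem.Dict.contains_insert]
            by_cases he : c' = c
            · subst he
              simp only [if_pos rfl]
              constructor
              · intro _; exact ⟨[i, index], rfl, by simp⟩
              · intro _; simp
            · rw [if_neg he]
              have : (c' == c) = false := beq_eq_false_iff_ne.mpr he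
              rw [this, Bool.false_or]
              exact R1 c'
          · intro c' i'
            rw [hget' c', pv_get?_erase]
            by_cases he : c' = c
            · subst he
              simp only [if_pos rfl]
              constructor
              · intro h'; cases h'
              · intro h'
                injection h' with h'
                exact absurd (congrArg List.length h') (by simp)
            · rw [if_neg he, if_neg he]; exact R2 c' i'
          · intro c'
            rw [hget' c']
            by_cases he : c' = c
            · simp [he]
            · rw [if_neg he]; exact R3 c'
        refine (ih _ _ g' hrel').trans ?_
        refine (hP.append_right _).trans ?_
        rw [List.append_assoc]
        rfl

theorem fsLoopB_eq (vals : List (List Nat)) (cur : List String) :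
    fsLoopB vals cur = (vals.filterMap pvFPair).foldl pvSwapOp cur := by
  induction vals generalizing cur with
  | nil => rfl
  | cons is rest ih =>
    cases is with
    | nil => simpa [fsLoopB, List.filterMap_cons, pvFPair] using ih cur
    | cons a t =>
      cases t with
      | nil => simpa [fsLoopB, List.filterMap_cons, pvFPair] using ih cur
      | cons b t' =>
        simp only [fsLoopB, List.foldl_cons, List.filterMap_cons, pvFPair] at *
        exact ih _

theorem pvFoldl_getElem? (ps : List (Nat × Nat)) (cur : List String) (k : Nat)
    (hnd : (pvFlat ps).Nodup) (hr : ∀ x ∈ pvFlat ps, x < cur.length) :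
    (ps.foldl pvSwapOp cur)[k]? =
      match ps.find? (fun p => p.1 == k || p.2 == k) with
      | some p => if p.1 = k then cur[p.2]? else cur[p.1]?
      | none => cur[k]? := by
  induction ps generalizing cur k with
  | nil => rfl
  | cons p rest ih =>
    obtain ⟨a, b⟩ := p
    have hflat : pvFlat ((a, b) :: rest) = a :: b :: pvFlat rest := by simp [pvFlat]
    rw [hflat] at hnd hr
    have hnd1 := List.nodup_cons.mp hnd
    have hnd2 := List.nodup_cons.mp hnd1.2
    have hab : a ≠ b := fun e => hnd1.1 (by rw [e]; exact List.mem_cons_self)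
    have haNot : a ∉ pvFlat rest := fun h => hnd1.1 (List.mem_cons_of_mem _ h)
    have hbNot : b ∉ pvFlat rest := hnd2.1
    have ha : a < cur.length := hr a (by simp)
    have hb : b < cur.length := hr b (by simp)
    set cur' := pvSwapOp cur (a, b) with hcur'
    have hlen' : cur'.length = cur.length := by simp [hcur', pvSwapOp]
    have hr' : ∀ x ∈ pvFlat rest, x < cur'.length := by
      intro x hx; rw [hlen']; exact hr x (by simp [hx])
    have hget' : ∀ x, x ≠ a → x ≠ b → cur'[x]? = cur[x]? := by
      intro x hxa hxb
      simp only [hcur', pvSwapOp]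
      rw [List.getElem?_set_ne (by exact fun e => hxb e.symm),
        List.getElem?_set_ne (by exact fun e => hxa e.symm)]
    have hgetA : cur'[a]? = cur[b]? := by
      simp only [hcur', pvSwapOp]
      rw [List.getElem?_set_ne (by exact fun e => hab e.symm),
        List.getElem?_set_self (by simpa using ha)]
      rw [List.getD_eq_getElem?_getD, List.getElem?_eq_getElem hb]
      rfl
    have hgetB : cur'[b]? = cur[a]? := by
      simp only [hcur', pvSwapOp]
      rw [List.getElem?_set_self (by simpa using hb)]
      rw [List.getD_eq_getElem?_getD, List.getElem?_eq_getElem ha]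
      rfl
    rw [List.foldl_cons, ← hcur', ih cur' k hnd2.2 hr']
    by_cases hka : a = k
    · have hpred : ((a, b).1 == k || (a, b).2 == k) = true := by simp [hka]
      rw [show List.find? (fun p : Nat × Nat => p.1 == k || p.2 == k) ((a, b) :: rest) = some (a, b)
        from List.find?_cons_of_pos hpred]
      have hnone : rest.find? (fun p => p.1 == k || p.2 == k) = none := by
        apply List.find?_eq_none.mpr
        intro p hp
        subst hka
        have h1 : p.1 ≠ a := fun e => haNot (by
          simp only [pvFlat, List.mem_flatMap]; exact ⟨p, hp, by simp [e]⟩)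
        have h2 : p.2 ≠ a := fun e => haNot (by
          simp only [pvFlat, List.mem_flatMap]; exact ⟨p, hp, by simp [e]⟩)
        simp [h1, h2]
      rw [hnone]
      show cur'[k]? = if (a, b).1 = k then cur[(a, b).2]? else cur[(a, b).1]?
      rw [if_pos hka]
      subst hka
      exact hgetA
    · by_cases hkb : b = k
      · have hpred : ((a, b).1 == k || (a, b).2 == k) = true := by simp [hkb]
        rw [show List.find? (fun p : Nat × Nat => p.1 == k || p.2 == k) ((a, b) :: rest) = some (a, b)
        from List.find?_cons_of_pos hpred]
        have hnone : rest.find? (fun p => p.1 == k || p.2 == k) = none := by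
          apply List.find?_eq_none.mpr
          intro p hp
          subst hkb
          have h1 : p.1 ≠ b := fun e => hbNot (by
            simp only [pvFlat, List.mem_flatMap]; exact ⟨p, hp, by simp [e]⟩)
          have h2 : p.2 ≠ b := fun e => hbNot (by
            simp only [pvFlat, List.mem_flatMap]; exact ⟨p, hp, by simp [e]⟩)
          simp [h1, h2]
        rw [hnone]
        show cur'[k]? = if (a, b).1 = k then cur[(a, b).2]? else cur[(a, b).1]?
        rw [if_neg hka]
        subst hkb
        exact hgetB
      · have hpred : ((a, b).1 == k || (a, b).2 == k) = false := by simp [hka, hkb]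
        rw [show List.find? (fun p : Nat × Nat => p.1 == k || p.2 == k) ((a, b) :: rest) =
            List.find? (fun p : Nat × Nat => p.1 == k || p.2 == k) rest
          from List.find?_cons_of_neg (by simp [hka, hkb])]
        cases hfind : rest.find? (fun p => p.1 == k || p.2 == k) with
        | none =>
          exact hget' k (fun e => hka e.symm) (fun e => hkb e.symm)
        | some p =>
          have hp : p ∈ rest := List.mem_of_find?_eq_some hfind
          have h1 : p.1 ≠ a := fun e => haNot (by
            simp only [pvFlat, List.mem_flatMap]; exact ⟨p, hp, by simp [e]⟩)
          have h1b : p.1 ≠ b := fun e => hbNot (by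
            simp only [pvFlat, List.mem_flatMap]; exact ⟨p, hp, by simp [e]⟩)
          have h2 : p.2 ≠ a := fun e => haNot (by
            simp only [pvFlat, List.mem_flatMap]; exact ⟨p, hp, by simp [e]⟩)
          have h2b : p.2 ≠ b := fun e => hbNot (by
            simp only [pvFlat, List.mem_flatMap]; exact ⟨p, hp, by simp [e]⟩)
          show (if p.1 = k then cur'[p.2]? else cur'[p.1]?) = if p.1 = k then cur[p.2]? else cur[p.1]?
          by_cases hp1 : p.1 = k
          · rw [if_pos hp1, if_pos hp1]
            exact hget' p.2 h2 h2b
          · rw [if_neg hp1, if_neg hp1]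
            exact hget' p.1 h1 h1b

theorem pvPair_unique (qs : List (Nat × Nat)) (hnd : (pvFlat qs).Nodup)
    (p q : Nat × Nat) (hp : p ∈ qs) (hq : q ∈ qs) (k : Nat)
    (hpk : p.1 = k ∨ p.2 = k) (hqk : q.1 = k ∨ q.2 = k) : p = q := by
  induction qs with
  | nil => cases hp
  | cons h rest ih =>
    have hflat : pvFlat (h :: rest) = h.1 :: h.2 :: pvFlat rest := by simp [pvFlat]
    rw [hflat] at hnd
    have hnd1 := List.nodup_cons.mp hnd
    have hnd2 := List.nodup_cons.mp hnd1.2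
    have h1Not : h.1 ∉ pvFlat rest := fun hx => hnd1.1 (List.mem_cons_of_mem _ hx)
    have h2Not : h.2 ∉ pvFlat rest := hnd2.1
    have hmemflat : ∀ r ∈ rest, r.1 ∈ pvFlat rest ∧ r.2 ∈ pvFlat rest := by
      intro r hr
      constructor <;> (simp only [pvFlat, List.mem_flatMap]; exact ⟨r, hr, by simp⟩)
    rcases List.mem_cons.mp hp with rfl | hp'
    · rcases List.mem_cons.mp hq with rfl | hq'
      · rfl
      · exfalso
        obtain ⟨hq1, hq2⟩ := hmemflat q hq'
        rcases hpk with hk | hk <;> rcases hqk with hk' | hk'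
        · exact h1Not (by rw [hk, ← hk'] at *; exact hq1)
        · exact h1Not (by rw [hk, ← hk'] at *; exact hq2)
        · exact h2Not (by rw [hk, ← hk'] at *; exact hq1)
        · exact h2Not (by rw [hk, ← hk'] at *; exact hq2)
    · rcases List.mem_cons.mp hq with rfl | hq'
      · exfalso
        obtain ⟨hp1, hp2⟩ := hmemflat p hp'
        rcases hpk with hk | hk <;> rcases hqk with hk' | hk'
        · exact h1Not (by rw [hk', ← hk] at *; exact hp1)
        · exact h2Not (by rw [hk', ← hk] at *; exact hp1)
        · exact h1Not (by rw [hk', ← hk] at *; exact hp2)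
        · exact h2Not (by rw [hk', ← hk] at *; exact hp2)
      · exact ih hnd2.2 hp' hq'

theorem pvFoldl_perm (ps qs : List (Nat × Nat)) (cur : List String) (h : ps.Perm qs)
    (hnd : (pvFlat ps).Nodup) (hr : ∀ x ∈ pvFlat ps, x < cur.length) :
    ps.foldl pvSwapOp cur = qs.foldl pvSwapOp cur := by
  have hflatperm : (pvFlat ps).Perm (pvFlat qs) := h.flatMap (by intro a _; exact List.Perm.refl _)
  have hndq : (pvFlat qs).Nodup := hflatperm.nodup_iff.mp hnd
  have hrq : ∀ x ∈ pvFlat qs, x < cur.length := fun x hx => hr x (hflatperm.mem_iff.mpr hx)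
  apply List.ext_getElem?
  intro k
  rw [pvFoldl_getElem? ps cur k hnd hr, pvFoldl_getElem? qs cur k hndq hrq]
  cases hfp : ps.find? (fun p => p.1 == k || p.2 == k) with
  | none =>
    cases hfq : qs.find? (fun p => p.1 == k || p.2 == k) with
    | none => rfl
    | some q =>
      exfalso
      have hqmem : q ∈ qs := List.mem_of_find?_eq_some hfq
      have hqpred := List.find?_some hfq
      have : ps.find? (fun p => p.1 == k || p.2 == k) ≠ none := by
        rw [Ne, List.find?_eq_none]
        push_neg
        exact ⟨q, h.mem_iff.mpr hqmem, hqpred⟩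
      exact this hfp
  | some p =>
    have hpmem : p ∈ ps := List.mem_of_find?_eq_some hfp
    have hppred := List.find?_some hfp
    cases hfq : qs.find? (fun p => p.1 == k || p.2 == k) with
    | none =>
      exfalso
      have : qs.find? (fun p => p.1 == k || p.2 == k) ≠ none := by
        rw [Ne, List.find?_eq_none]
        push_neg
        exact ⟨p, h.mem_iff.mp hpmem, hppred⟩
      exact this hfq
    | some q =>
      have hqmem : q ∈ qs := List.mem_of_find?_eq_some hfq
      have hqpred := List.find?_some hfq
      have : p = q := by
        apply pvPair_unique qs hndq p q (h.mem_iff.mp hpmem) hqmem k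
        · simpa using hppred
        · simpa using hqpred
      rw [this]

-- ===== VERDICT (by name: the statement is the Claim_ definition above) =====
theorem first_swap_spec : Claim_equal_first_swap := by
  intro str _ _
  show first_swap str = first_swap_alt str
  have hH1 : ∀ p ∈ pvEnum str 0, str[p.1]? = some p.2 := by
    intro p hp
    obtain ⟨k, hk, h1, h2⟩ := pvEnum_mem str 0 p hp
    rw [h1, h2, Nat.zero_add]
    exact List.getElem?_eq_getElem hk
  have hH2 := pvEnum_pairwise str 0
  have hH3 : ∀ c i, (PySem.Dict.empty : PySem.Dict Char Nat).get? c = some i →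
      ∀ p ∈ pvEnum str 0, i < p.1 := by
    intro c i h
    rw [PySem.Dict.get?_empty] at h
    cases h
  have hInj : ∀ c c' i, (PySem.Dict.empty : PySem.Dict Char Nat).get? c = some i →
      (PySem.Dict.empty : PySem.Dict Char Nat).get? c' = some i → c = c' := by
    intro c c' i h
    rw [PySem.Dict.get?_empty] at h
    cases h
  have hA : first_swap str =
      (pvSwapsA (pvEnum str 0) PySem.Dict.empty PySem.Dict.empty).foldl pvSwapOp str :=
    fsLoopA_eq (pvEnum str 0) _ _ str hH1 hH2 hH3
  obtain ⟨hnd, hmem⟩ := pvSwapsA_nodup (pvEnum str 0) PySem.Dict.empty PySem.Dict.empty hH2 hH3 hInj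
  have hrange : ∀ x ∈ pvFlat (pvSwapsA (pvEnum str 0) PySem.Dict.empty PySem.Dict.empty),
      x < str.length := by
    intro x hx
    rcases hmem x hx with ⟨c, h⟩ | ⟨p, hp, he⟩
    · rw [PySem.Dict.get?_empty] at h; cases h
    · obtain ⟨k, hk, h1, _⟩ := pvEnum_mem str 0 p hp
      omega
  have hrel : pvRel PySem.Dict.empty PySem.Dict.empty (PySem.Dict.empty : PySem.Dict Char (List Nat)) := by
    refine ⟨?_, ?_, ?_, ?_⟩
    · intro c
      rw [PySem.Dict.contains_empty, PySem.Dict.get?_empty]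
      simp
    · intro c i
      rw [PySem.Dict.get?_empty, PySem.Dict.get?_empty]
      simp
    · intro c
      rw [PySem.Dict.get?_empty]
      simp
    · rw [PySem.Dict.keys_empty]
      exact List.nodup_nil
  have hperm := pvP_perm (pvEnum str 0) PySem.Dict.empty PySem.Dict.empty PySem.Dict.empty hrel
  have hPempty : pvP (PySem.Dict.empty : PySem.Dict Char (List Nat)) = [] := rfl
  rw [hPempty, List.nil_append] at hperm
  have hB : first_swap_alt str =
      (pvP (pvBuildG (pvEnum str 0) PySem.Dict.empty)).foldl pvSwapOp str := by
    show fsLoopB (pvBuildG (pvEnum str 0) PySem.Dict.empty).values str = _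
    rw [fsLoopB_eq]
    rfl
  rw [hA, hB]
  exact pvFoldl_perm _ _ str hperm.symm hnd hrange
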